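-- pv_equiv track=rewrite | github.com/MrDoda/ai-training | homework_5_prisoner/prisoner.py | play_iterated
-- ===== SOURCE A (Python) =====
-- YEARS_CC = 1   # both cooperate
--
-- YEARS_DD = 3   # both defect
--
-- YEARS_DC = 0   # I defect, opponent cooperates (go free)
--
-- YEARS_CD = 5   # I cooperate, opponent defects (sucker)
--
-- ROUNDS   = 150 # interactions per pairing
--
-- def betray(my_history, opponent_history, genome):
--     """
--     Reactive memory-1 strategy: 5-bit genome
--       [init, resp(CC), resp(CD), resp(DC), resp(DD)]
--     Returns 0 (cooperate) or 1 (defect).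
--     """
--     # First move: no history yet
--     if not my_history:
--         return genome[0]
--
--     me_last  = my_history[-1]
--     opp_last = opponent_history[-1]
--
--     # Four possible last-round cases:
--     if me_last == 0 and opp_last == 0:  # CC
--         return genome[1]
--     elif me_last == 0 and opp_last == 1:  # CD
--         return genome[2]
--     elif me_last == 1 and opp_last == 0:  # DC
--         return genome[3]
--     else:  # me_last == 1 and opp_last == 1 (DD)
--         return genome[4]
--
-- def play_iterated(genome1, genome2, rounds=ROUNDS):
--     hist1, hist2 = [], []
--     years1 = years2 = 0
--     for _ in range(rounds):
--         m1 = betray(hist1, hist2, genome1)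
--         m2 = betray(hist2, hist1, genome2)
--         hist1.append(m1)
--         hist2.append(m2)
--         # assign years based on moves
--         if m1 == 0 and m2 == 0:
--             years1 += YEARS_CC; years2 += YEARS_CC
--         elif m1 == 1 and m2 == 1:
--             years1 += YEARS_DD; years2 += YEARS_DD
--         elif m1 == 1 and m2 == 0:
--             years1 += YEARS_DC; years2 += YEARS_CD
--         else:
--             years1 += YEARS_CD; years2 += YEARS_DC
--     return years1, years2
-- ===== SOURCE B (Python) =====
-- def play_iterated(genome1, genome2, rounds=150):
--     # Cycle detection: the next pair of moves depends only on the previous pair,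
--     # so the pair sequence enters a cycle within <= 25 steps; sum the cycle once.
--     if rounds <= 0:
--         return (0, 0)
--
--     def react(a, b):
--         if a == 0 and b == 0:
--             return 1
--         if a == 0 and b == 1:
--             return 2
--         if a == 1 and b == 0:
--             return 3
--         return 4
--
--     def pay(m):
--         m1, m2 = m
--         if m1 == 0 and m2 == 0:
--             return (1, 1)
--         if m1 == 1 and m2 == 1:
--             return (3, 3)
--         if m1 == 1 and m2 == 0:
--             return (0, 5)
--         return (5, 0)
--
--     def step(m):
--         m1, m2 = m
--         return (genome1[react(m1, m2)], genome2[react(m2, m1)])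
--
--     states = []
--     s = (genome1[0], genome2[0])
--     while len(states) < rounds and s not in states:
--         states.append(s)
--         s = step(s)
--
--     pays = [pay(t) for t in states]
--     y1 = sum(p[0] for p in pays)
--     y2 = sum(p[1] for p in pays)
--     if len(states) == rounds:
--         return (y1, y2)
--
--     mu = states.index(s)
--     lam = len(states) - mu
--     cyc = pays[mu:]
--     c1 = sum(p[0] for p in cyc)
--     c2 = sum(p[1] for p in cyc)
--     q, r = divmod(rounds - len(states), lam)
--     for t in cyc[:r]:
--         y1 += t[0]
--         y2 += t[1]
--     return (y1 + q * c1, y2 + q * c2)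
-- ===== Notes on version B (the rewrite author's own statement) =====
-- stated objective: faster
-- what changed: B replaces A's round-by-round simulation (which rebuilds nothing but iterates `rounds` times) by cycle detection on the pair of last moves — the next pair depends only on the previous pair, so the pair sequence repeats within at most 26 steps; B sums the pre-period once, multiplies the cycle sum by the number of full cycles and adds the remainder.
-- outside the precondition, e.g. on play_iterated([1], [1], 1): A returns (3, 3), B raises IndexError; on play_iterated([0], [0], 1): A returns (1, 1), B raises IndexError
import Mathlib
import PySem

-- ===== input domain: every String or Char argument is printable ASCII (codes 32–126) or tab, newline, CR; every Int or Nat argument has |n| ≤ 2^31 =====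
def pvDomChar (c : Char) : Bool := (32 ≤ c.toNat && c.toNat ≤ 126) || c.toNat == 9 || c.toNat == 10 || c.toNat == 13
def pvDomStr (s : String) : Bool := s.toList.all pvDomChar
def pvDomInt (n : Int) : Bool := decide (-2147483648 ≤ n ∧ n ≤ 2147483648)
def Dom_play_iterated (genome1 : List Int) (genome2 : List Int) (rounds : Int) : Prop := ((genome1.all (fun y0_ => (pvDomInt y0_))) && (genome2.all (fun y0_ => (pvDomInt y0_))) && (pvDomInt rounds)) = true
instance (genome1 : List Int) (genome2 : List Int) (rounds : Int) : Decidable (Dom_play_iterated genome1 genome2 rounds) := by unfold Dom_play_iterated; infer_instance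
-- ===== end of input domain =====

-- B replaces A's round-by-round simulation by cycle detection over move pairs (the next pair of
-- moves depends only on the previous pair), summing the detected cycle once and multiplying.


-- ===== PORT A =====
-- betray: reactive memory-1 strategy (literal port of A's helper)
def pvBetray (my_history : List Int) (opponent_history : List Int) (genome : List Int) : Int :=
  if my_history = [] then (PySem.List.pyGet? genome 0).getD 0
  else
    let me_last := (PySem.List.pyGet? my_history (-1)).getD 0
    let opp_last := (PySem.List.pyGet? opponent_history (-1)).getD 0
    if me_last = 0 ∧ opp_last = 0 then (PySem.List.pyGet? genome 1).getD 0
    else if me_last = 0 ∧ opp_last = 1 then (PySem.List.pyGet? genome 2).getD 0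
    else if me_last = 1 ∧ opp_last = 0 then (PySem.List.pyGet? genome 3).getD 0
    else (PySem.List.pyGet? genome 4).getD 0

def play_iterated (genome1 : List Int) (genome2 : List Int) (rounds : Int) : Int × Int :=
  let r := (PySem.List.pyRange 0 rounds 1).foldl
    (fun (st : List Int × List Int × Int × Int) _ =>
      let m1 := pvBetray st.1 st.2.1 genome1
      let m2 := pvBetray st.2.1 st.1 genome2
      let h1 := st.1 ++ [m1]
      let h2 := st.2.1 ++ [m2]
      if m1 = 0 ∧ m2 = 0 then (h1, h2, st.2.2.1 + 1, st.2.2.2 + 1)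
      else if m1 = 1 ∧ m2 = 1 then (h1, h2, st.2.2.1 + 3, st.2.2.2 + 3)
      else if m1 = 1 ∧ m2 = 0 then (h1, h2, st.2.2.1 + 0, st.2.2.2 + 5)
      else (h1, h2, st.2.2.1 + 5, st.2.2.2 + 0))
    (([] : List Int), ([] : List Int), (0 : Int), (0 : Int))
  (r.2.2.1, r.2.2.2)

-- ===== PORT B =====
def pvReact (a : Int) (b : Int) : Int :=
  if a = 0 ∧ b = 0 then 1
  else if a = 0 ∧ b = 1 then 2
  else if a = 1 ∧ b = 0 then 3
  else 4

def pvPay (m : Int × Int) : Int × Int :=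
  if m.1 = 0 ∧ m.2 = 0 then (1, 1)
  else if m.1 = 1 ∧ m.2 = 1 then (3, 3)
  else if m.1 = 1 ∧ m.2 = 0 then (0, 5)
  else (5, 0)

def pvStep (genome1 : List Int) (genome2 : List Int) (m : Int × Int) : Int × Int :=
  ((PySem.List.pyGet? genome1 (pvReact m.1 m.2)).getD 0,
   (PySem.List.pyGet? genome2 (pvReact m.2 m.1)).getD 0)

-- the while loop: collect states until a repeat or until 'rounds' states are collected
def pvLoop (genome1 : List Int) (genome2 : List Int) :
    Nat → List (Int × Int) → (Int × Int) → List (Int × Int) × (Int × Int)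
  | 0, states, s => (states, s)
  | fuel + 1, states, s =>
    if s ∈ states then (states, s)
    else pvLoop genome1 genome2 fuel (states ++ [s]) (pvStep genome1 genome2 s)

def play_iterated_alt (genome1 : List Int) (genome2 : List Int) (rounds : Int) : Int × Int :=
  if rounds ≤ 0 then (0, 0)
  else
    let s0 := ((PySem.List.pyGet? genome1 0).getD 0, (PySem.List.pyGet? genome2 0).getD 0)
    let res := pvLoop genome1 genome2 rounds.toNat [] s0
    let states := res.1
    let pays := states.map pvPay
    let y1 := (pays.map Prod.fst).sum
    let y2 := (pays.map Prod.snd).sum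
    if states.length = rounds.toNat then (y1, y2)
    else
      let mu := (PySem.List.index? states res.2).getD 0
      let lam := states.length - mu
      let cyc := pays.drop mu
      let c1 := (cyc.map Prod.fst).sum
      let c2 := (cyc.map Prod.snd).sum
      let rem := rounds.toNat - states.length
      let q := rem / lam
      let r := rem % lam
      let hd := cyc.take r
      (y1 + (hd.map Prod.fst).sum + (q : Int) * c1,
       y2 + (hd.map Prod.snd).sum + (q : Int) * c2)

-- ===== PRECONDITION & SPEC =====
-- Pre_ excludes inputs with rounds > 0 and a genome shorter than 5: A raises IndexError on most of
-- them, and on the few where A happens to return (only low genome indices reached) B's cycle probe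
-- raises too; which indices are reached cannot be stated without re-simulating the run.
def Pre_play_iterated (genome1 : List Int) (genome2 : List Int) (rounds : Int) : Prop :=
  rounds ≤ 0 ∨ (5 ≤ genome1.length ∧ 5 ≤ genome2.length)
instance (genome1 : List Int) (genome2 : List Int) (rounds : Int) : Decidable (Pre_play_iterated genome1 genome2 rounds) := by unfold Pre_play_iterated; infer_instance
def pvWitness_play_iterated : List Int × List Int × Int := ([0, 0, 1, 0, 1], [1, 1, 0, 1, 0], 7)

def Spec_play_iterated (genome1 : List Int) (genome2 : List Int) (rounds : Int) (out : Int × Int) : Prop := out = play_iterated_alt genome1 genome2 rounds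
instance (genome1 : List Int) (genome2 : List Int) (rounds : Int) (out : Int × Int) : Decidable (Spec_play_iterated genome1 genome2 rounds out) := by unfold Spec_play_iterated; infer_instance

-- ===== CLAIM (what is proved, stated in full; the proofs are below) =====
def Claim_equal_play_iterated : Prop := ∀ (genome1 : List Int) (genome2 : List Int) (rounds : Int), Dom_play_iterated genome1 genome2 rounds → Pre_play_iterated genome1 genome2 rounds → Spec_play_iterated genome1 genome2 rounds (play_iterated genome1 genome2 rounds)

-- ===== LEMMAS AND PROOFS =====

-- the mathematical pair sequence both programs follow
def pvSeq (genome1 : List Int) (genome2 : List Int) : Nat → Int × Int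
  | 0 => ((PySem.List.pyGet? genome1 0).getD 0, (PySem.List.pyGet? genome2 0).getD 0)
  | n + 1 => pvStep genome1 genome2 (pvSeq genome1 genome2 n)

-- A's betray on two one-longer histories reads the last pair through the same table as pvStep
theorem pvBetray_append (xs ys : List Int) (a b : Int) (g : List Int) :
    pvBetray (xs ++ [a]) (ys ++ [b]) g = (PySem.List.pyGet? g (pvReact a b)).getD 0 := by
  unfold pvBetray pvReact
  rw [if_neg (by simp)]
  simp only [PySem.List.pyGet?_neg_one_append_singleton, Option.getD_some]
  split_ifs <;> rfl

theorem pvBetray_hist1 (g1 g2 : List Int) (n : Nat) :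
    pvBetray ((List.range n).map (fun i => (pvSeq g1 g2 i).1))
      ((List.range n).map (fun i => (pvSeq g1 g2 i).2)) g1 = (pvSeq g1 g2 n).1 := by
  cases n with
  | zero => simp [pvBetray, pvSeq]
  | succ k =>
    rw [List.range_succ, List.map_append, List.map_append, List.map_singleton,
      List.map_singleton, pvBetray_append]
    rfl

theorem pvBetray_hist2 (g1 g2 : List Int) (n : Nat) :
    pvBetray ((List.range n).map (fun i => (pvSeq g1 g2 i).2))
      ((List.range n).map (fun i => (pvSeq g1 g2 i).1)) g2 = (pvSeq g1 g2 n).2 := by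
  cases n with
  | zero => simp [pvBetray, pvSeq]
  | succ k =>
    rw [List.range_succ, List.map_append, List.map_append, List.map_singleton,
      List.map_singleton, pvBetray_append]
    rfl

-- A's fold, characterised round by round
theorem pvFoldA (g1 g2 : List Int) (n : Nat) :
    (List.range n).foldl
      (fun (st : List Int × List Int × Int × Int) _ =>
        let m1 := pvBetray st.1 st.2.1 g1
        let m2 := pvBetray st.2.1 st.1 g2
        let h1 := st.1 ++ [m1]
        let h2 := st.2.1 ++ [m2]
        if m1 = 0 ∧ m2 = 0 then (h1, h2, st.2.2.1 + 1, st.2.2.2 + 1)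
        else if m1 = 1 ∧ m2 = 1 then (h1, h2, st.2.2.1 + 3, st.2.2.2 + 3)
        else if m1 = 1 ∧ m2 = 0 then (h1, h2, st.2.2.1 + 0, st.2.2.2 + 5)
        else (h1, h2, st.2.2.1 + 5, st.2.2.2 + 0))
      (([] : List Int), ([] : List Int), (0 : Int), (0 : Int)) =
    ((List.range n).map (fun i => (pvSeq g1 g2 i).1),
     (List.range n).map (fun i => (pvSeq g1 g2 i).2),
     ((List.range n).map (fun i => (pvPay (pvSeq g1 g2 i)).1)).sum,
     ((List.range n).map (fun i => (pvPay (pvSeq g1 g2 i)).2)).sum) := by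
  induction n with
  | zero => simp
  | succ k ih =>
    rw [List.range_succ, List.foldl_append, ih]
    simp only [List.foldl_cons, List.foldl_nil, pvBetray_hist1, pvBetray_hist2]
    simp only [List.map_append, List.map_singleton, List.sum_append, List.sum_cons,
      List.sum_nil]
    unfold pvPay
    split_ifs <;> simp_all

theorem play_iterated_char (genome1 genome2 : List Int) (rounds : Int) :
    play_iterated genome1 genome2 rounds =
      (((List.range rounds.toNat).map (fun i => (pvPay (pvSeq genome1 genome2 i)).1)).sum,
       ((List.range rounds.toNat).map (fun i => (pvPay (pvSeq genome1 genome2 i)).2)).sum) := by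
  unfold play_iterated
  rw [PySem.List.pyRange_one]
  simp only [Int.sub_zero, List.foldl_map]
  rw [pvFoldA]

-- the while loop of B, characterised: it walks pvSeq collecting distinct states
theorem pvLoop_spec (g1 g2 : List Int) :
    ∀ (fuel k : Nat),
      (∀ i, i < k → ∀ j, j < i → pvSeq g1 g2 j ≠ pvSeq g1 g2 i) →
      ∃ n, k ≤ n ∧ n ≤ k + fuel ∧
        pvLoop g1 g2 fuel ((List.range k).map (pvSeq g1 g2)) (pvSeq g1 g2 k) =
          ((List.range n).map (pvSeq g1 g2), pvSeq g1 g2 n) ∧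
        (n = k + fuel ∨ ∃ m, m < n ∧ pvSeq g1 g2 m = pvSeq g1 g2 n) := by
  intro fuel
  induction fuel with
  | zero =>
    intro k _
    exact ⟨k, le_rfl, by omega, rfl, Or.inl rfl⟩
  | succ f ih =>
    intro k hk
    by_cases hmem : pvSeq g1 g2 k ∈ (List.range k).map (pvSeq g1 g2)
    · obtain ⟨i, hi, hieq⟩ := List.mem_map.mp hmem
      rw [List.mem_range] at hi
      refine ⟨k, le_rfl, by omega, ?_, Or.inr ⟨i, hi, hieq⟩⟩
      unfold pvLoop
      rw [if_pos hmem]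
    · have hk' : ∀ i, i < k + 1 → ∀ j, j < i → pvSeq g1 g2 j ≠ pvSeq g1 g2 i := by
        intro i hi j hj
        rcases Nat.lt_succ_iff_lt_or_eq.mp hi with h | h
        · exact hk i h j hj
        · subst h
          intro hcon
          exact hmem (List.mem_map.mpr ⟨j, List.mem_range.mpr hj, hcon⟩)
      obtain ⟨n, h1, h2, h3, h4⟩ := ih (k + 1) hk'
      refine ⟨n, by omega, by omega, ?_, ?_⟩
      · unfold pvLoop
        rw [if_neg hmem]
        have : (List.range k).map (pvSeq g1 g2) ++ [pvSeq g1 g2 k] =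
            (List.range (k + 1)).map (pvSeq g1 g2) := by
          rw [List.range_succ, List.map_append, List.map_singleton]
        rw [this]
        exact h3
      · rcases h4 with h | h
        · exact Or.inl (by omega)
        · exact Or.inr h

-- mod-collapse for an eventually periodic function
theorem pvModCollapse (f : Nat → Int) (mu lam : Nat) (hlam : 0 < lam)
    (hper : ∀ t, mu ≤ t → f (t + lam) = f t) :
    ∀ u, f (mu + u) = f (mu + u % lam) := by
  intro u
  induction u using Nat.strong_induction_on with
  | _ u ihu =>
    by_cases h : u < lam
    · rw [Nat.mod_eq_of_lt h]
    · have h1 : u % lam = (u - lam) % lam := Nat.mod_eq_sub_mod (by omega)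
      have h2 : mu + u = (mu + (u - lam)) + lam := by omega
      rw [h2, hper _ (by omega), ihu (u - lam) (by omega), h1]

-- sum of a list of values over a shifted range
theorem pvSumRangeAdd (f : Nat → Int) (a b : Nat) :
    ((List.range (a + b)).map f).sum =
      ((List.range a).map f).sum + ((List.range b).map (fun t => f (a + t))).sum := by
  rw [List.range_add, List.map_append, List.sum_append, List.map_map]
  rfl

-- summing q full cycles plus a remainder of a lam-periodic table
theorem pvChunkSum (g : Nat → Int) (lam : Nat) (_hlam : 0 < lam) :
    ∀ (q r : Nat), r < lam →
      ((List.range (q * lam + r)).map (fun t => g (t % lam))).sum =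
        (q : Int) * ((List.range lam).map g).sum + ((List.range r).map g).sum := by
  intro q
  induction q with
  | zero =>
    intro r hr
    simp only [Nat.cast_zero, zero_mul, zero_add]
    congr 1
    apply List.map_congr_left
    intro t ht
    rw [List.mem_range] at ht
    rw [Nat.mod_eq_of_lt (by omega)]
  | succ q ihq =>
    intro r hr
    have h : (q + 1) * lam + r = lam + (q * lam + r) := by ring
    rw [h, pvSumRangeAdd]
    have h2 : ((List.range lam).map (fun t => g (t % lam))).sum =
        ((List.range lam).map g).sum := by
      congr 1
      apply List.map_congr_left
      intro t ht
      rw [List.mem_range] at ht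
      rw [Nat.mod_eq_of_lt ht]
    have h3 : ((List.range (q * lam + r)).map (fun t => g ((lam + t) % lam))).sum =
        ((List.range (q * lam + r)).map (fun t => g (t % lam))).sum := by
      congr 1
      apply List.map_congr_left
      intro t _
      rw [Nat.add_mod_left]
    rw [h2, h3, ihq r hr]
    push_cast
    ring

-- the main splitting identity: prefix + q cycles + remainder
theorem pvSumPeriodic (f : Nat → Int) (mu lam : Nat) (hlam : 0 < lam)
    (hper : ∀ t, mu ≤ t → f (t + lam) = f t) (N : Nat) (hN : mu + lam ≤ N) :
    ((List.range N).map f).sum =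
      ((List.range (mu + lam)).map f).sum
      + (((N - (mu + lam)) / lam : Nat) : Int) * ((List.range lam).map (fun j => f (mu + j))).sum
      + ((List.range ((N - (mu + lam)) % lam)).map (fun j => f (mu + j))).sum := by
  have hsplit : N = (mu + lam) + (N - (mu + lam)) := by omega
  conv_lhs => rw [hsplit, pvSumRangeAdd]
  have h1 : ((List.range (N - (mu + lam))).map (fun t => f (mu + lam + t))).sum =
      ((List.range (N - (mu + lam))).map (fun t => f (mu + t % lam))).sum := by
    congr 1
    apply List.map_congr_left
    intro t _
    have : mu + lam + t = mu + (lam + t) := by omega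
    rw [this, pvModCollapse f mu lam hlam hper (lam + t), Nat.add_mod_left]
  rw [h1]
  have h2 : N - (mu + lam) = (N - (mu + lam)) / lam * lam + (N - (mu + lam)) % lam := by
    rw [Nat.mul_comm]
    exact (Nat.div_add_mod _ _).symm
  have h3 : ((List.range (N - (mu + lam))).map (fun t => f (mu + t % lam))).sum =
      (((N - (mu + lam)) / lam : Nat) : Int) * ((List.range lam).map (fun j => f (mu + j))).sum
      + ((List.range ((N - (mu + lam)) % lam)).map (fun j => f (mu + j))).sum := by
    conv_lhs => rw [h2]
    exact pvChunkSum (fun j => f (mu + j)) lam hlam _ _ (Nat.mod_lt _ hlam)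
  rw [h3]
  ring

theorem play_iterated_alt_char (genome1 genome2 : List Int) (rounds : Int) :
    play_iterated_alt genome1 genome2 rounds =
      (((List.range rounds.toNat).map (fun i => (pvPay (pvSeq genome1 genome2 i)).1)).sum,
       ((List.range rounds.toNat).map (fun i => (pvPay (pvSeq genome1 genome2 i)).2)).sum) := by
  by_cases hr : rounds ≤ 0
  · have h0 : rounds.toNat = 0 := Int.toNat_of_nonpos hr
    unfold play_iterated_alt
    rw [if_pos hr, h0]
    simp
  · unfold play_iterated_alt
    rw [if_neg hr]
    obtain ⟨n, hn0, hnN, hloop, hdisj⟩ := pvLoop_spec genome1 genome2 rounds.toNat 0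
      (by omega)
    have hloop' : pvLoop genome1 genome2 rounds.toNat []
        ((PySem.List.pyGet? genome1 0).getD 0, (PySem.List.pyGet? genome2 0).getD 0) =
        ((List.range n).map (pvSeq genome1 genome2), pvSeq genome1 genome2 n) := hloop
    simp only [hloop', List.map_map, List.length_map, List.length_range]
    by_cases hnEq : n = rounds.toNat
    · rw [if_pos hnEq]
      subst hnEq
      simp [Function.comp_def]
    · rw [if_neg hnEq]
      have hnlt : n < rounds.toNat := by omega
      rcases hdisj with h | ⟨m, hm, hmeq⟩
      · omega
      have hmem : pvSeq genome1 genome2 n ∈ (List.range n).map (pvSeq genome1 genome2) :=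
        List.mem_map.mpr ⟨m, List.mem_range.mpr hm, hmeq⟩
      obtain ⟨mu, hidx⟩ := Option.isSome_iff_exists.mp
        ((PySem.List.index?_isSome_iff _ _).mpr hmem)
      obtain ⟨hmuLen, hmuGet, hmuMin⟩ := PySem.List.getElem_of_index?_eq_some hidx
      have hmuLt : mu < n := by simpa using hmuLen
      have hmuEq : pvSeq genome1 genome2 mu = pvSeq genome1 genome2 n := by
        simpa using hmuGet
      rw [hidx]
      simp only [Option.getD_some]
      -- periodicity of pvSeq past mu with period n - mu
      have hper : ∀ t, mu ≤ t →
          pvSeq genome1 genome2 (t + (n - mu)) = pvSeq genome1 genome2 t := by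
        intro t ht
        induction t, ht using Nat.le_induction with
        | base =>
          have h1 : mu + (n - mu) = n := by omega
          rw [h1, ← hmuEq]
        | succ t ht iht =>
          have h1 : t + 1 + (n - mu) = (t + (n - mu)) + 1 := by omega
          rw [h1]
          show pvStep genome1 genome2 (pvSeq genome1 genome2 (t + (n - mu))) = _
          rw [iht]
          rfl
      have hlam : 0 < n - mu := by omega
      have hrange : List.range n =
          List.range mu ++ (List.range (n - mu)).map (fun j => mu + j) := by
        conv_lhs => rw [show n = mu + (n - mu) from by omega, List.range_add]
      have hdrop : List.drop mu ((List.range n).map (pvPay ∘ pvSeq genome1 genome2)) =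
          (List.range (n - mu)).map (fun j => pvPay (pvSeq genome1 genome2 (mu + j))) := by
        rw [hrange, List.map_append]
        have hl : ((List.range mu).map (pvPay ∘ pvSeq genome1 genome2)).length = mu := by simp
        rw [List.drop_left' hl, List.map_map]
        rfl
      have hmod : (rounds.toNat - n) % (n - mu) < n - mu := Nat.mod_lt _ hlam
      have htake : List.take ((rounds.toNat - n) % (n - mu))
            ((List.range (n - mu)).map (fun j => pvPay (pvSeq genome1 genome2 (mu + j)))) =
          (List.range ((rounds.toNat - n) % (n - mu))).map
            (fun j => pvPay (pvSeq genome1 genome2 (mu + j))) := by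
        rw [← List.map_take, List.take_range, Nat.min_eq_left hmod.le]
      rw [hdrop, htake]
      simp only [Prod.mk.injEq, List.map_map, Function.comp_def]
      have hsum1 := pvSumPeriodic (fun i => (pvPay (pvSeq genome1 genome2 i)).1) mu (n - mu)
        hlam (fun t ht => by simp only [hper t ht]) rounds.toNat (by omega)
      have hsum2 := pvSumPeriodic (fun i => (pvPay (pvSeq genome1 genome2 i)).2) mu (n - mu)
        hlam (fun t ht => by simp only [hper t ht]) rounds.toNat (by omega)
      rw [show mu + (n - mu) = n from by omega] at hsum1 hsum2
      rw [hsum1, hsum2]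
      constructor <;> ring
-- ===== VERDICT (by name: the statement is the Claim_ definition above) =====
theorem play_iterated_spec : Claim_equal_play_iterated := by
  intro genome1 genome2 rounds _ _
  unfold Spec_play_iterated
  rw [play_iterated_char, play_iterated_alt_char]
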